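-- pv_equiv track=rewrite | github.com/mridulk97/phylonn | analysis/code_histogram.py | build_group_histograms
-- ===== SOURCE A (Python) =====
-- from operator import add
--
-- def build_group_histograms(hist_arr, hist_arr_nonattr,
--                            species_groups_arr, num_of_levels,
--                            labels_to_idx,
--                            anticlassification=False):
--     group_levels_attr = []
--     group_levels_non_attr = []
--
--     for level in range(num_of_levels-1): # last level already plotted.
--
--         group_arr ={}
--         if anticlassification:
--             group_arr_nonattr ={}
--
--         for species_group in species_groups_arr[level]:
--
--             for indx, species in enumerate(species_group):
--                 species_indx = labels_to_idx[species]
--                 if indx == 0: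
--                     group_arr[species] = hist_arr[species_indx]
--                     if anticlassification:
--                         group_arr_nonattr[species] = hist_arr_nonattr[species_indx]
--                 else:
--                     group_arr[species_group[0]] = list(map(add, group_arr[species_group[0]], hist_arr[species_indx]))
--                     if anticlassification:
--                         group_arr_nonattr[species_group[0]] =  list(map(add, group_arr_nonattr[species_group[0]], hist_arr_nonattr[species_indx]))
--
--         group_levels_attr.append(group_arr)
--         if anticlassification:
--             group_levels_non_attr.append(group_arr_nonattr)
--
--     return group_levels_attr, group_levels_non_attr
-- ===== SOURCE B (Python) =====
-- from operator import add
-- from functools import reduce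
--
-- def build_group_histograms(hist_arr, hist_arr_nonattr,
--                            species_groups_arr, num_of_levels,
--                            labels_to_idx,
--                            anticlassification=False):
--     def level_sums(arr, groups):
--         # one summed histogram per non-empty group, keyed by its first species:
--         # column-wise reduce over the members' histograms (zip truncates to the
--         # shortest, exactly like repeated map(add, ...))
--         return {g[0]: [reduce(add, col)
--                        for col in zip(*(arr[labels_to_idx[s]] for s in g))]
--                 for g in groups if g}
--     levels = [species_groups_arr[level] for level in range(num_of_levels - 1)]
--     group_levels_attr = [level_sums(hist_arr, groups) for groups in levels]
--     group_levels_non_attr = ([level_sums(hist_arr_nonattr, groups) for groups in levels]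
--                              if anticlassification else [])
--     return group_levels_attr, group_levels_non_attr
-- ===== Notes on version B (the rewrite author's own statement) =====
-- stated objective: idiomatic
-- what changed: Per level, B builds each group's summed histogram in one shot -- collect the members' histograms, transpose with zip(*...) and reduce(add) each column into a dict/list comprehension -- instead of A's enumerate-driven loop that repeatedly overwrites a dict entry with pairwise map(add) folds.
import Mathlib
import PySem

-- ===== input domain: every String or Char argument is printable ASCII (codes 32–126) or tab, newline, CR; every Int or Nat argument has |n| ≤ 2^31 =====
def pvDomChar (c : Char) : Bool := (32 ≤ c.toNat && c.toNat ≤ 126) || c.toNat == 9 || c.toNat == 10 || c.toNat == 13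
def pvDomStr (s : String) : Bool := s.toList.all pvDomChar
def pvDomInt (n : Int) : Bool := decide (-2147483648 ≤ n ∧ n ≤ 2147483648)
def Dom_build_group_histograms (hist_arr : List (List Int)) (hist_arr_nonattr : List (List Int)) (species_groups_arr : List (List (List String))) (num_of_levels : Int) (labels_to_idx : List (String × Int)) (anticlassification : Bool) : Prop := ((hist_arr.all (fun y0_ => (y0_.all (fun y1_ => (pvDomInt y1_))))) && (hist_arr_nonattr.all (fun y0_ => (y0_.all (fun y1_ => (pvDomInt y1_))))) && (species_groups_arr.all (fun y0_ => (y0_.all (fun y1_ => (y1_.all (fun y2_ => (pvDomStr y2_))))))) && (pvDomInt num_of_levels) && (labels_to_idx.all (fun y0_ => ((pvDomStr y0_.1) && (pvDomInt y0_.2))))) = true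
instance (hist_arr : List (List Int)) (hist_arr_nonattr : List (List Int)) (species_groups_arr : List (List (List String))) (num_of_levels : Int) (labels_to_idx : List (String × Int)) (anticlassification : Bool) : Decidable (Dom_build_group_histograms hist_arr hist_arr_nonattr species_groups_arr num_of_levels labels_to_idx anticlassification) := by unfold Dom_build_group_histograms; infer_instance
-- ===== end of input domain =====

-- B replaces A's enumerate-driven pairwise map(add) dict updates by a per-level dict
-- comprehension that sums each group column-wise (zip(*hists) + reduce(add)); idiomatic,
-- same cost. Equivalence of the return values is proved on Pre_ (where Python A returns).

-- `arr[labels_to_idx[s]]` (shared subexpression of both Pythons)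
def pvHist (arr : List (List Int)) (labels_to_idx : List (String × Int)) (s : String) : List Int :=
  (PySem.List.pyGet? arr (((PySem.Dict.mk labels_to_idx).get? s).getD 0)).getD []

-- ===== PORT A =====
-- list(map(add, a, b)) : truncates at the shorter list
def pvAddMap (a b : List Int) : List Int := List.zipWith (· + ·) a b

-- the body of A's `for indx, species in enumerate(species_group)` loop (state: the two dicts)
def bghStepA (hist_arr hist_arr_nonattr : List (List Int)) (labels_to_idx : List (String × Int))
    (anticlassification : Bool) (species_group : List String)
    (d : PySem.Dict String (List Int) × PySem.Dict String (List Int)) (p : Int × String) :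
    PySem.Dict String (List Int) × PySem.Dict String (List Int) :=
  let species := p.2
  if p.1 == 0 then
    (d.1.insert species (pvHist hist_arr labels_to_idx species),
     if anticlassification then d.2.insert species (pvHist hist_arr_nonattr labels_to_idx species) else d.2)
  else
    let k := (PySem.List.pyGet? species_group 0).getD ""
    (d.1.insert k (pvAddMap (d.1.getD k []) (pvHist hist_arr labels_to_idx species)),
     if anticlassification then d.2.insert k (pvAddMap (d.2.getD k []) (pvHist hist_arr_nonattr labels_to_idx species)) else d.2)

-- one iteration of A's `for level in range(num_of_levels-1)` loop: build the two dicts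
def bghLevelA (hist_arr hist_arr_nonattr : List (List Int)) (labels_to_idx : List (String × Int))
    (anticlassification : Bool) (species_groups_arr : List (List (List String))) (level : Int) :
    PySem.Dict String (List Int) × PySem.Dict String (List Int) :=
  ((PySem.List.pyGet? species_groups_arr level).getD []).foldl
    (fun d g => (PySem.List.enumerate g).foldl
       (bghStepA hist_arr hist_arr_nonattr labels_to_idx anticlassification g) d)
    (PySem.Dict.empty, PySem.Dict.empty)

def build_group_histograms (hist_arr : List (List Int)) (hist_arr_nonattr : List (List Int)) (species_groups_arr : List (List (List String))) (num_of_levels : Int) (labels_to_idx : List (String × Int)) (anticlassification : Bool) : (List (List (String × List Int))) × (List (List (String × List Int))) :=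
  (PySem.List.pyRange 0 (num_of_levels - 1) 1).foldl
    (fun acc level =>
      let d := bghLevelA hist_arr hist_arr_nonattr labels_to_idx anticlassification species_groups_arr level
      (acc.1 ++ [d.1.items], if anticlassification then acc.2 ++ [d.2.items] else acc.2))
    ([], [])

-- ===== PORT B =====
-- zip(*(h :: t)) on Int lists: columns, truncated at the shortest row
def pvZipStar : List Int → List (List Int) → List (List Int)
  | [], _ => []
  | x :: xs, rest =>
    if rest.all (fun l => !l.isEmpty) then
      (x :: rest.map (fun l => l.headD 0)) :: pvZipStar xs (rest.map List.tail)
    else []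

-- reduce(add, col) (col is never empty in B)
def pvReduceAdd : List Int → Int
  | [] => 0
  | a :: l => l.foldl (· + ·) a

-- B's per-level dict comprehension {g[0]: [reduce(add, col) for col in zip(*hists)] for g in groups if g}
def pvLevelSums (arr : List (List Int)) (labels_to_idx : List (String × Int))
    (groups : List (List String)) : PySem.Dict String (List Int) :=
  (groups.filter (fun g => !g.isEmpty)).foldl
    (fun out g =>
      let hists := g.map (fun s => pvHist arr labels_to_idx s)
      let cols := match hists with | [] => [] | h :: t => pvZipStar h t
      out.insert ((PySem.List.pyGet? g 0).getD "") (cols.map pvReduceAdd))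
    PySem.Dict.empty

def build_group_histograms_alt (hist_arr : List (List Int)) (hist_arr_nonattr : List (List Int)) (species_groups_arr : List (List (List String))) (num_of_levels : Int) (labels_to_idx : List (String × Int)) (anticlassification : Bool) : (List (List (String × List Int))) × (List (List (String × List Int))) :=
  let levels := (PySem.List.pyRange 0 (num_of_levels - 1) 1).map
    (fun level => (PySem.List.pyGet? species_groups_arr level).getD [])
  (levels.map (fun groups => (pvLevelSums hist_arr labels_to_idx groups).items),
   if anticlassification then
     levels.map (fun groups => (pvLevelSums hist_arr_nonattr labels_to_idx groups).items)
   else [])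

-- ===== PRECONDITION & SPEC =====
-- Pre_ = exactly the inputs on which Python A returns normally: every plotted level exists,
-- every species of those levels is a key of labels_to_idx, and its index is a valid Python
-- index into hist_arr (and into hist_arr_nonattr when anticlassification).
def Pre_build_group_histograms (hist_arr : List (List Int)) (hist_arr_nonattr : List (List Int)) (species_groups_arr : List (List (List String))) (num_of_levels : Int) (labels_to_idx : List (String × Int)) (anticlassification : Bool) : Prop :=
  num_of_levels - 1 ≤ (species_groups_arr.length : Int) ∧
  ∀ gl ∈ species_groups_arr.take (num_of_levels - 1).toNat, ∀ g ∈ gl, ∀ s ∈ g,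
    (((PySem.Dict.mk labels_to_idx).get? s).bind
        (fun i => PySem.List.pyGet? hist_arr i)).isSome = true ∧
    (anticlassification = true →
      (((PySem.Dict.mk labels_to_idx).get? s).bind
          (fun i => PySem.List.pyGet? hist_arr_nonattr i)).isSome = true)
instance (hist_arr : List (List Int)) (hist_arr_nonattr : List (List Int)) (species_groups_arr : List (List (List String))) (num_of_levels : Int) (labels_to_idx : List (String × Int)) (anticlassification : Bool) : Decidable (Pre_build_group_histograms hist_arr hist_arr_nonattr species_groups_arr num_of_levels labels_to_idx anticlassification) := by unfold Pre_build_group_histograms; infer_instance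

def pvWitness_build_group_histograms : List (List Int) × List (List Int) × List (List (List String)) × Int × (List (String × Int)) × Bool :=
  ([[1, 2]], [[3]], [[["a", "b"], ["b"]]], 2, [("a", 0), ("b", 0)], true)

def Spec_build_group_histograms (hist_arr : List (List Int)) (hist_arr_nonattr : List (List Int)) (species_groups_arr : List (List (List String))) (num_of_levels : Int) (labels_to_idx : List (String × Int)) (anticlassification : Bool) (out : (List (List (String × List Int))) × (List (List (String × List Int)))) : Prop := out = build_group_histograms_alt hist_arr hist_arr_nonattr species_groups_arr num_of_levels labels_to_idx anticlassification
instance (hist_arr : List (List Int)) (hist_arr_nonattr : List (List Int)) (species_groups_arr : List (List (List String))) (num_of_levels : Int) (labels_to_idx : List (String × Int)) (anticlassification : Bool) (out : (List (List (String × List Int))) × (List (List (String × List Int)))) : Decidable (Spec_build_group_histograms hist_arr hist_arr_nonattr species_groups_arr num_of_levels labels_to_idx anticlassification out) := by unfold Spec_build_group_histograms; infer_instance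

-- ===== CLAIM (what is proved, stated in full; the proofs are below) =====
def Claim_equal_build_group_histograms : Prop := ∀ (hist_arr : List (List Int)) (hist_arr_nonattr : List (List Int)) (species_groups_arr : List (List (List String))) (num_of_levels : Int) (labels_to_idx : List (String × Int)) (anticlassification : Bool), Dom_build_group_histograms hist_arr hist_arr_nonattr species_groups_arr num_of_levels labels_to_idx anticlassification → Pre_build_group_histograms hist_arr hist_arr_nonattr species_groups_arr num_of_levels labels_to_idx anticlassification → Spec_build_group_histograms hist_arr hist_arr_nonattr species_groups_arr num_of_levels labels_to_idx anticlassification (build_group_histograms hist_arr hist_arr_nonattr species_groups_arr num_of_levels labels_to_idx anticlassification)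

-- ===== LEMMAS AND PROOFS =====

-- proof-only: the net effect of A's inner loop on one group
def pvStepV (arr : List (List Int)) (lti : List (String × Int))
    (d : PySem.Dict String (List Int)) (g : List String) : PySem.Dict String (List Int) :=
  match g with
  | [] => d
  | s0 :: rest =>
    d.insert s0 (rest.foldl (fun a s => pvAddMap a (pvHist arr lti s)) (pvHist arr lti s0))

lemma pvReduceAdd_cons₂ (a b : Int) (l : List Int) :
    pvReduceAdd (a :: b :: l) = pvReduceAdd ((a + b) :: l) := by
  simp [pvReduceAdd, List.foldl]

lemma pvZipStar_zipWith (h : List Int) : ∀ (g : List Int) (t : List (List Int)),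
    (pvZipStar (List.zipWith (· + ·) h g) t).map pvReduceAdd
      = (pvZipStar h (g :: t)).map pvReduceAdd := by
  induction h with
  | nil => intro g t; simp [pvZipStar]
  | cons x xs ih =>
    intro g t
    cases g with
    | nil => simp [pvZipStar]
    | cons y ys =>
      simp only [List.zipWith, pvZipStar, List.all_cons, List.isEmpty_cons, Bool.not_false,
        Bool.true_and, List.map_cons, List.headD, List.tail]
      split
      · simp only [List.map_cons]
        rw [pvReduceAdd_cons₂, ih ys (t.map List.tail)]
      · rfl

lemma pvZipStar_nil_map (h : List Int) : (pvZipStar h []).map pvReduceAdd = h := by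
  induction h with
  | nil => rfl
  | cons x xs ih => simp [pvZipStar, pvReduceAdd, ih]

lemma foldl_addMap_eq_cols : ∀ (t : List (List Int)) (h : List Int),
    t.foldl (fun a b => pvAddMap a b) h = (pvZipStar h t).map pvReduceAdd := by
  intro t
  induction t with
  | nil => intro h; simp [pvZipStar_nil_map]
  | cons g t ih =>
    intro h
    simp only [List.foldl_cons]
    rw [ih (pvAddMap h g)]
    exact pvZipStar_zipWith h g t

lemma bgh_tailfold (ha hn : List (List Int)) (lti : List (String × Int)) (anti : Bool)
    (s0 : String) (orig : List String) :
    ∀ (rest : List String) (n : Int), 0 < n →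
    ∀ (d1 d2 : PySem.Dict String (List Int)) (a1 a2 : List Int),
    (PySem.List.enumerate rest n).foldl (bghStepA ha hn lti anti (s0 :: orig))
        (d1.insert s0 a1, if anti then d2.insert s0 a2 else d2)
      = (d1.insert s0 (rest.foldl (fun a s => pvAddMap a (pvHist ha lti s)) a1),
         if anti then d2.insert s0 (rest.foldl (fun a s => pvAddMap a (pvHist hn lti s)) a2)
         else d2) := by
  intro rest
  induction rest with
  | nil => intro n _ d1 d2 a1 a2; simp [PySem.List.enumerate_nil]
  | cons s rest ih =>
    intro n hn0 d1 d2 a1 a2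
    rw [PySem.List.enumerate_cons]
    simp only [List.foldl_cons]
    have hne : (n == (0 : Int)) = false := by
      simp only [beq_eq_false_iff_ne, ne_eq]; omega
    have hstep : bghStepA ha hn lti anti (s0 :: orig)
        (d1.insert s0 a1, if anti then d2.insert s0 a2 else d2) (n, s)
        = (d1.insert s0 (pvAddMap a1 (pvHist ha lti s)),
           if anti then d2.insert s0 (pvAddMap a2 (pvHist hn lti s)) else d2) := by
      cases anti <;>
        simp [bghStepA, hne, PySem.Dict.getD_insert_self, PySem.Dict.insert_insert_self]
    rw [hstep, ih (n + 1) (by omega)]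

lemma bgh_groupfold (ha hn : List (List Int)) (lti : List (String × Int)) (anti : Bool)
    (g : List String) (d : PySem.Dict String (List Int) × PySem.Dict String (List Int)) :
    (PySem.List.enumerate g).foldl (bghStepA ha hn lti anti g) d
      = (pvStepV ha lti d.1 g, if anti then pvStepV hn lti d.2 g else d.2) := by
  cases g with
  | nil => cases anti <;> simp [PySem.List.enumerate_nil, pvStepV]
  | cons s0 rest =>
    rw [PySem.List.enumerate_cons]
    simp only [List.foldl_cons]
    have hstep : bghStepA ha hn lti anti (s0 :: rest) d ((0 : Int), s0)
        = (d.1.insert s0 (pvHist ha lti s0),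
           if anti then d.2.insert s0 (pvHist hn lti s0) else d.2) := by
      cases anti <;> simp [bghStepA]
    rw [hstep, show (0:Int)+1 = 1 from rfl, bgh_tailfold ha hn lti anti s0 rest rest 1 (by omega)]
    simp [pvStepV]

lemma bgh_levelfold (ha hn : List (List Int)) (lti : List (String × Int)) (anti : Bool) :
    ∀ (groups : List (List String)) (d1 d2 : PySem.Dict String (List Int)),
    groups.foldl (fun d g => (PySem.List.enumerate g).foldl (bghStepA ha hn lti anti g) d) (d1, d2)
      = (groups.foldl (pvStepV ha lti) d1,
         if anti then groups.foldl (pvStepV hn lti) d2 else d2) := by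
  intro groups
  induction groups with
  | nil => intro d1 d2; cases anti <;> simp
  | cons g groups ih =>
    intro d1 d2
    simp only [List.foldl_cons]
    rw [bgh_groupfold ha hn lti anti g (d1, d2)]
    cases anti
    · simpa using ih (pvStepV ha lti d1 g) d2
    · simpa using ih (pvStepV ha lti d1 g) (pvStepV hn lti d2 g)

lemma pvLevelSums_eq_foldl (arr : List (List Int)) (lti : List (String × Int)) :
    ∀ (groups : List (List String)) (d : PySem.Dict String (List Int)),
    (groups.filter (fun g => !g.isEmpty)).foldl
      (fun out g =>
        let hists := g.map (fun s => pvHist arr lti s)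
        let cols := match hists with | [] => [] | h :: t => pvZipStar h t
        out.insert ((PySem.List.pyGet? g 0).getD "") (cols.map pvReduceAdd)) d
      = groups.foldl (pvStepV arr lti) d := by
  intro groups
  induction groups with
  | nil => intro d; rfl
  | cons g groups ih =>
    intro d
    cases g with
    | nil => simpa [pvStepV] using ih d
    | cons s0 rest =>
      simp only [List.filter_cons, List.isEmpty_cons, Bool.not_false, if_true, List.foldl_cons]
      rw [ih]
      congr 1
      simp only [List.map_cons, pvStepV, PySem.List.pyGet?_zero, List.getElem?_cons_zero,
        Option.getD_some]
      rw [← foldl_addMap_eq_cols (rest.map (fun s => pvHist arr lti s)) (pvHist arr lti s0),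
        List.foldl_map]

lemma bgh_topfold (anti : Bool) (F G : Int → List (String × List Int)) :
    ∀ (L : List Int) (a b : List (List (String × List Int))),
    L.foldl (fun acc lvl => (acc.1 ++ [F lvl], if anti then acc.2 ++ [G lvl] else acc.2)) (a, b)
      = (a ++ L.map F, if anti then b ++ L.map G else b) := by
  intro L
  induction L with
  | nil => intro a b; cases anti <;> simp
  | cons x L ih =>
    intro a b
    simp only [List.foldl_cons, List.map_cons]
    cases anti
    · simpa using ih (a ++ [F x]) b
    · simpa using ih (a ++ [F x]) (b ++ [G x])

lemma bghLevelA_eq (ha hn : List (List Int)) (lti : List (String × Int)) (anti : Bool)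
    (sga : List (List (List String))) (level : Int) :
    bghLevelA ha hn lti anti sga level
      = (pvLevelSums ha lti ((PySem.List.pyGet? sga level).getD []),
         if anti then pvLevelSums hn lti ((PySem.List.pyGet? sga level).getD [])
         else PySem.Dict.empty) := by
  unfold bghLevelA pvLevelSums
  rw [bgh_levelfold, pvLevelSums_eq_foldl, pvLevelSums_eq_foldl]

-- ===== VERDICT (by name: the statement is the Claim_ definition above) =====
theorem build_group_histograms_spec : Claim_equal_build_group_histograms := by
  intro ha hn sga nol lti anti _dom _pre
  unfold Spec_build_group_histograms build_group_histograms build_group_histograms_alt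
  rw [bgh_topfold anti
    (fun lvl => (bghLevelA ha hn lti anti sga lvl).1.items)
    (fun lvl => (bghLevelA ha hn lti anti sga lvl).2.items)]
  cases anti <;>
    simp [bghLevelA_eq, List.map_map, Function.comp]
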